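-- pv_equiv track=rewrite | github.com/HENKLE231/MADO | TextFormatter.py | get_last_incident_index
-- ===== SOURCE A (Python) =====
-- def get_last_incident_index(text, character):
--     """
--         :param text: (String) Texto para análise.
--         :param character: (String) Caractere para ser encontrado.
--         :return: (Int) Índice de última incidencia do caractere.
--     """
--     last_incidence = None
--     i = len(text) - 1
--     while i > 0:
--         if character == text[i]:
--             last_incidence = i
--             break
--         i -= 1
--     return last_incidence
-- ===== SOURCE B (Python) =====
-- def get_last_incident_index(text, character):
--     last = None
--     for i in range(len(text)):
--         if text[i] == character:
--             last = i
--     return last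
-- ===== Notes on version B (the rewrite author's own statement) =====
-- stated objective: simpler
-- what changed: B is a forward single pass accumulating the most recent match over all indices (including 0), instead of A's backward scan with early break whose loop condition i > 0 skips index 0.
-- intended difference: When the character occurs at index 0 and nowhere later (A's 'while i > 0' never examines index 0), A returns None while B returns 0, which is the intended last-occurrence index. — e.g. on get_last_incident_index("a", "a"): A returns none, B returns some 0
import Mathlib
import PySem

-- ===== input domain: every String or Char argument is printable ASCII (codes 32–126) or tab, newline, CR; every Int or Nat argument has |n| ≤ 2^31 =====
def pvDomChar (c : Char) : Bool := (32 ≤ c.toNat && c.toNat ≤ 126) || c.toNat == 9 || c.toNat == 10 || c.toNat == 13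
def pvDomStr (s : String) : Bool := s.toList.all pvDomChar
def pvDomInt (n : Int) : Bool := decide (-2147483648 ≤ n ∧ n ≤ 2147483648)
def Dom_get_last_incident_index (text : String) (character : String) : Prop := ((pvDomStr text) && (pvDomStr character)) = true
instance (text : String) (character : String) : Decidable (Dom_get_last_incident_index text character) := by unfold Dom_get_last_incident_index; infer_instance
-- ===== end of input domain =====

-- B replaces A's backward scan with early break by a simpler forward single pass that
-- accumulates the most recent match; B intentionally also considers index 0, which A's
-- loop condition 'i > 0' skips (see D_ below).

-- ===== PORT A =====
-- A's while loop: i counts down from len(text)-1 while i > 0, breaking on the first match.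
def pvGoA (character : String) (cs : List Char) : Nat → Option Int
  | 0 => none
  | j + 1 =>
    if character = String.ofList [cs.getD (j + 1) ' '] then some ((j : Int) + 1)
    else pvGoA character cs j

def get_last_incident_index (text : String) (character : String) : Option Int :=
  pvGoA character text.toList (text.toList.length - 1)

-- ===== PORT B =====
-- Source B: forward for-loop over range(len(text)), overwriting 'last' on every match.
def get_last_incident_index_alt (text : String) (character : String) : Option Int :=
  (List.range text.toList.length).foldl
    (fun last i => if String.ofList [text.toList.getD i ' '] = character then some (i : Int) else last)
    none

-- ===== PRECONDITION & SPEC =====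
-- When the character occurs at index 0 and nowhere later (A's 'while i > 0' never examines
-- index 0), A returns None while B returns 0, which is the intended last-occurrence index.
def D_get_last_incident_index (text : String) (character : String) : Prop :=
  text.toList ≠ [] ∧ character = String.ofList [text.toList.getD 0 ' '] ∧
    ∀ i < text.toList.length, 1 ≤ i → character ≠ String.ofList [text.toList.getD i ' ']
instance (text : String) (character : String) : Decidable (D_get_last_incident_index text character) := by
  unfold D_get_last_incident_index; infer_instance

def Spec_get_last_incident_index (text : String) (character : String) (out : Option Int) : Prop :=
  ¬ D_get_last_incident_index text character → out = get_last_incident_index_alt text character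
instance (text : String) (character : String) (out : Option Int) : Decidable (Spec_get_last_incident_index text character out) := by
  unfold Spec_get_last_incident_index; infer_instance

def pvDiffWitness_get_last_incident_index : String × String := ("a", "a")
def pvDiffWitnessOut_get_last_incident_index : (Option Int) × (Option Int) := (none, some 0)

-- ===== CLAIM (what is proved, stated in full; the proofs are below) =====
def Claim_unchanged_get_last_incident_index : Prop := ∀ (text : String) (character : String), Dom_get_last_incident_index text character → Spec_get_last_incident_index text character (get_last_incident_index text character)
def Claim_changed_get_last_incident_index : Prop := Dom_get_last_incident_index (pvDiffWitness_get_last_incident_index.1) (pvDiffWitness_get_last_incident_index.2) ∧ D_get_last_incident_index (pvDiffWitness_get_last_incident_index.1) (pvDiffWitness_get_last_incident_index.2) ∧ get_last_incident_index (pvDiffWitness_get_last_incident_index.1) (pvDiffWitness_get_last_incident_index.2) = pvDiffWitnessOut_get_last_incident_index.1 ∧ get_last_incident_index_alt (pvDiffWitness_get_last_incident_index.1) (pvDiffWitness_get_last_incident_index.2) = pvDiffWitnessOut_get_last_incident_index.2 ∧ pvDiffWitnessOut_get_last_incident_index.1 ≠ pvDiffWitnessOut_get_last_incident_index.2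
def Claim_exact_get_last_incident_index : Prop := ∀ (text : String) (character : String), Dom_get_last_incident_index text character → D_get_last_incident_index text character → get_last_incident_index text character ≠ get_last_incident_index_alt text character

-- ===== LEMMAS AND PROOFS =====

-- A's loop returns none iff no index in 1..m matches.
theorem pvGoA_eq_none (character : String) (cs : List Char) (m : Nat) :
    pvGoA character cs m = none ↔
      ∀ j, 1 ≤ j → j ≤ m → character ≠ String.ofList [cs.getD j ' '] := by
  induction m with
  | zero =>
    simp [pvGoA]
    intro j h1 h2; omega
  | succ m ih =>
    by_cases h : character = String.ofList [cs.getD (m + 1) ' ']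
    · simp only [pvGoA, if_pos h]
      constructor
      · intro hc; exact absurd hc (by simp)
      · intro hall; exact absurd h (hall (m + 1) (by omega) (le_refl _))
    · simp only [pvGoA, if_neg h, ih]
      constructor
      · intro hall j h1 h2
        rcases Nat.lt_or_ge j (m + 1) with hj | hj
        · exact hall j h1 (by omega)
        · have : j = m + 1 := by omega
          subst this; exact h
      · intro hall j h1 h2; exact hall j h1 (by omega)

-- B's fold over 0..m equals A's loop over m..1, except that a match at index 0
-- surfaces only when A's loop finds nothing.
theorem pvFold_eq (character : String) (cs : List Char) (m : Nat) :
    (List.range (m + 1)).foldl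
      (fun last i => if String.ofList [cs.getD i ' '] = character then some (i : Int) else last)
      none =
    (if character = String.ofList [cs.getD 0 ' '] ∧ pvGoA character cs m = none
     then some 0 else pvGoA character cs m) := by
  induction m with
  | zero =>
    by_cases h : character = String.ofList [cs.getD 0 ' '] <;>
      simp [pvGoA, List.range_succ, h, eq_comm]
  | succ m ih =>
    rw [List.range_succ, List.foldl_append]
    by_cases h : character = String.ofList [cs.getD (m + 1) ' ']
    · simp [pvGoA, h, eq_comm]
    · have hb : ¬ String.ofList [cs.getD (m + 1) ' '] = character := fun hh => h hh.symm
      simp only [List.foldl_cons, List.foldl_nil, if_neg hb, ih, pvGoA, if_neg h]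

-- ===== VERDICT (by name: the statement is the Claim_ definition above) =====
theorem get_last_incident_index_changed : Claim_changed_get_last_incident_index := by
  unfold Claim_changed_get_last_incident_index; decide

theorem get_last_incident_index_spec : Claim_unchanged_get_last_incident_index := by
  intro text character _ hND
  unfold get_last_incident_index get_last_incident_index_alt
  unfold D_get_last_incident_index at hND
  generalize hcs : text.toList = cs at *
  cases cs with
  | nil => simp [pvGoA]
  | cons c cs' =>
    have hlen : (c :: cs').length - 1 = cs'.length := by simp
    have hlen2 : (c :: cs').length = cs'.length + 1 := by simp
    rw [hlen, hlen2, pvFold_eq]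
    split_ifs with hc
    · exfalso
      apply hND
      refine ⟨by simp, hc.1, ?_⟩
      intro i hi h1
      have := (pvGoA_eq_none character (c :: cs') cs'.length).mp hc.2
      exact this i h1 (by simp at hi; omega)
    · rfl

theorem get_last_incident_index_tight : Claim_exact_get_last_incident_index := by
  intro text character _ hD
  unfold get_last_incident_index get_last_incident_index_alt
  unfold D_get_last_incident_index at hD
  generalize hcs : text.toList = cs at *
  rcases hD with ⟨hne, h0, hrest⟩
  cases cs with
  | nil => exact absurd rfl hne
  | cons c cs' =>
    have hnone : pvGoA character (c :: cs') cs'.length = none := by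
      rw [pvGoA_eq_none]
      intro j h1 h2
      exact hrest j (by simp; omega) h1
    have hlen : (c :: cs').length - 1 = cs'.length := by simp
    have hlen2 : (c :: cs').length = cs'.length + 1 := by simp
    rw [hlen, hlen2, pvFold_eq, hnone, if_pos ⟨h0, rfl⟩]
    simp
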